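-- pv_equiv track=rewrite | github.com/pdqnguyen/PEMcoupling | coupling/utils.py | quad_sum_names
-- ===== SOURCE A (Python) =====
-- def quad_sum_names(channel_names):
--     """
--     Find tri-axial channel names and make corresponding quadrature-summed channel names.
--
--     Parameters
--     ----------
--     channel_names : list of strings
--
--     Returns
--     -------
--     qsum_dict : dict
--         Keys are quad-sum channel names; values are lists of X, Y, and Z channel names.
--     """
--     qsum_dict = {}
--     for name in channel_names:
--         short_name = name.replace('_DQ', '')
--         if short_name.split('_')[-1] in ['X', 'Y', 'Z']:
--             qsum_name = short_name[:-2] + '_XYZ'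
--             if qsum_name not in qsum_dict.keys():
--                 qsum_dict[qsum_name] = [name]
--             else:
--                 qsum_dict[qsum_name].append(name)
--     qsum_dict = {name: axes for name, axes in qsum_dict.items() if len(axes) == 3}
--     return qsum_dict
-- ===== SOURCE B (Python) =====
-- def quad_sum_names(channel_names):
--     # pair each tri-axial channel with its quad-sum key in one pass
--     keyed = []
--     for name in channel_names:
--         short_name = name.replace('_DQ', '')
--         if short_name.split('_')[-1] in ('X', 'Y', 'Z'):
--             keyed.append((short_name[:-2] + '_XYZ', name))
--     # distinct keys in first-appearance order, then gather each group by scan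
--     result = {}
--     for key in dict.fromkeys(k for k, _ in keyed):
--         group = [n for k, n in keyed if k == key]
--         if len(group) == 3:
--             result[key] = group
--     return result
-- ===== Notes on version B (the rewrite author's own statement) =====
-- stated objective: alternative
-- what changed: Replaces A's incremental dict-of-lists (append-or-insert per name, then a length-3 filter pass) with a flat (key, name) pair list built in one pass, an ordered key dedup, and a per-key gathering scan that emits only groups of exactly three.
import Mathlib
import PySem

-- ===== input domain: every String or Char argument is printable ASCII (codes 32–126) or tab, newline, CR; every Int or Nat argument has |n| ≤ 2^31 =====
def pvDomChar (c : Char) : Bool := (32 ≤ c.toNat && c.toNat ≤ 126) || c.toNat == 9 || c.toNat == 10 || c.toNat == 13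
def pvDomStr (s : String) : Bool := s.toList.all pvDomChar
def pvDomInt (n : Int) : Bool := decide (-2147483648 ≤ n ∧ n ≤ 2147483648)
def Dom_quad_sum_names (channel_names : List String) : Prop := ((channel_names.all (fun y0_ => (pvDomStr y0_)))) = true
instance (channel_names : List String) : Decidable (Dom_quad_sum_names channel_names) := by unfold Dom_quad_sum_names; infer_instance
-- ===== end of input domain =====

-- B replaces A's incremental dict-of-lists with a flat (key, name) pair list, an ordered key
-- dedup and a per-key gathering scan — same return value, alternative decomposition.

-- ===== PORT A =====
-- loop body of A's 'for name in channel_names'; split('_') of any string is nonempty, so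
-- Python's [-1] never raises and PySem.List.pyGetD … (-1) [] is exact there
def qstepA (d : PySem.Dict String (List String)) (name : String) :
    PySem.Dict String (List String) :=
  let short_name := PySem.Chars.replace name.toList "_DQ".toList []
  if PySem.List.pyGetD (PySem.Chars.splitOn short_name "_".toList) (-1) []
      ∈ ["X".toList, "Y".toList, "Z".toList] then
    let qsum_name := String.ofList (PySem.List.slice short_name none (some (-2)) ++ "_XYZ".toList)
    if qsum_name ∉ d.keys then d.insert qsum_name [name]
    else d.modify qsum_name [] (fun axes => axes ++ [name])
  else d

-- final dict comprehension: iterating a dict's items in order and reinserting the kept ones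
-- is exactly a filter of its association list
def quad_sum_names (channel_names : List String) : List (String × List String) :=
  ((channel_names.foldl qstepA PySem.Dict.empty).items).filter (fun p => p.2.length == 3)

-- ===== PORT B =====
-- Source B: quad-sum key of a channel name, or none if it is not tri-axial
def qsumKey? (name : String) : Option String :=
  let short_name := PySem.Chars.replace name.toList "_DQ".toList []
  if PySem.List.pyGetD (PySem.Chars.splitOn short_name "_".toList) (-1) []
      ∈ ["X".toList, "Y".toList, "Z".toList] then
    some (String.ofList (PySem.List.slice short_name none (some (-2)) ++ "_XYZ".toList))
  else none

def quad_sum_names_alt (channel_names : List String) : List (String × List String) :=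
  let keyed := channel_names.filterMap (fun name => (qsumKey? name).map (fun k => (k, name)))
  let keys := PySem.List.dedup (keyed.map (fun p => p.1))
  keys.filterMap (fun key =>
    let group := (keyed.filter (fun p => p.1 == key)).map (fun p => p.2)
    if group.length == 3 then some (key, group) else none)

-- ===== PRECONDITION & SPEC =====
def Spec_quad_sum_names (channel_names : List String) (out : List (String × List String)) : Prop := out = quad_sum_names_alt channel_names
instance (channel_names : List String) (out : List (String × List String)) : Decidable (Spec_quad_sum_names channel_names out) := by unfold Spec_quad_sum_names; infer_instance

-- ===== CLAIM (what is proved, stated in full; the proofs are below) =====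
def Claim_equal_quad_sum_names : Prop := ∀ (channel_names : List String), Dom_quad_sum_names channel_names → Spec_quad_sum_names channel_names (quad_sum_names channel_names)

-- ===== LEMMAS AND PROOFS =====

theorem filter_map_eq_filterMap {α β : Type} (l : List α) (f : α → β) (p : β → Bool) :
    (l.map f).filter p = l.filterMap (fun x => if p (f x) then some (f x) else none) := by
  induction l with
  | nil => rfl
  | cons x xs ih =>
    simp only [List.map_cons, List.filter_cons, List.filterMap_cons]
    by_cases h : p (f x) <;> simp [h, ih]

-- ===== VERDICT (by name: the statement is the Claim_ definition above) =====
theorem quad_sum_names_spec : Claim_equal_quad_sum_names := by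
  intro channel_names _
  unfold Spec_quad_sum_names quad_sum_names quad_sum_names_alt
  set keyed := channel_names.filterMap (fun name => (qsumKey? name).map (fun k => (k, name)))
    with hkeyed
  have hfold : channel_names.foldl qstepA PySem.Dict.empty =
      keyed.foldl (fun d p => d.modify p.1 [] (fun axes => axes ++ [p.2])) PySem.Dict.empty := by
    rw [hkeyed, List.foldl_filterMap]
    congr 1
    funext d name
    unfold qstepA qsumKey?
    by_cases hc : PySem.List.pyGetD
        (PySem.Chars.splitOn (PySem.Chars.replace name.toList "_DQ".toList []) "_".toList) (-1) []
        ∈ ["X".toList, "Y".toList, "Z".toList]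
    · simp only [hc, if_pos, Option.map_some]
      set q := String.ofList (PySem.List.slice (PySem.Chars.replace name.toList "_DQ".toList [])
        none (some (-2)) ++ "_XYZ".toList)
      by_cases hk : q ∈ d.keys
      · simp [hk]
      · have hcf : d.contains q = false := by
          rw [← Bool.not_eq_true, PySem.Dict.contains_iff_mem_keys]; exact hk
        simp [hk, PySem.Dict.modify, PySem.Dict.getD_of_not_contains d [] hcf]
    · rw [if_neg hc, if_neg hc]; rfl
  rw [hfold]
  set D := keyed.foldl (fun d p => d.modify p.1 [] (fun axes => axes ++ [p.2]))
    PySem.Dict.empty with hD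
  have hnodup : D.keys.Nodup := by
    rw [hD]
    exact PySem.Dict.nodup_keys_foldl_modify_key keyed (fun p => p.1) []
      (fun d p axes => axes ++ [p.2]) PySem.Dict.empty (by simp)
  have hkeys : D.keys = PySem.Set.ofList (keyed.map (fun p => p.1)) := by
    rw [hD, PySem.Dict.keys_foldl_modify_key keyed (fun p => p.1) []
      (fun d p axes => axes ++ [p.2]) PySem.Dict.empty]
    simp [PySem.Set.update_nil_left]
  have hgetD : ∀ c, D.getD c [] = (keyed.filter (fun p => p.1 == c)).map (fun p => p.2) := by
    intro c
    rw [hD, PySem.Dict.getD_foldl_modify_append keyed PySem.Dict.empty c]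
    simp
  rw [PySem.Dict.items_eq_map_keys D hnodup [], hkeys]
  simp only [PySem.List.dedup_eq_ofList]
  rw [filter_map_eq_filterMap]
  apply List.filterMap_congr
  intro k _
  simp only [hgetD k]
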